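-- pv_equiv track=rewrite | github.com/mosesoghene/javaClass | phaseGateOne/java/studentgrades.py | calculateSubjectStatistics
-- ===== SOURCE A (Python) =====
-- def calculateSubjectStatistics(scores, subject):
--     highest = 0;
--     lowest = 100;
--     highestStudent = 0;
--     lowestStudent = 0;
--     passes = 0;
--     totalScore = 0;
--
--     for student in range(len(scores)):
--       if (scores[student][subject] > highest):
--         highest = scores[student][subject];
--         highestStudent = student;
--
--       if (scores[student][subject] < lowest):
--         lowest = scores[student][subject];
--         lowestStudent = student;
--
--       if (scores[student][subject] >= 50): passes += 1;
--       totalScore += scores[student][subject];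
--
--
--     return [highest, lowest, highestStudent, lowestStudent, passes, totalScore];
-- ===== SOURCE B (Python) =====
-- def calculateSubjectStatistics(scores, subject):
--     col = [row[subject] for row in scores]
--     highest = max(col)
--     lowest = min(col)
--     passes = sum(1 for v in col if v >= 50)
--     return [highest, lowest, col.index(highest), col.index(lowest), passes, sum(col)]
-- ===== Notes on version B (the rewrite author's own statement) =====
-- stated objective: idiomatic
-- what changed: Replaces the fused index loop threading six accumulators with a one-shot column extraction followed by builtins (max/min, list.index for the positions, a conditional count, sum); Pre_ excludes the empty score table, on which B's max([]) raises while A returns its 0/100 sentinels.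
-- intended difference: On a nonempty table whose subject column is entirely <= 0 with a negative first entry (or entirely >= 100 with a first entry > 100), A's 0/100 sentinel initialization makes it report a highest (resp. lowest) of 0 (resp. 100) that no student obtained, or a stale student index 0; B reports the actual extremum and its first position, which is what 'highest/lowest score' means. — e.g. on calculateSubjectStatistics([[-5]], 0): A returns [0, -5, 0, 0, 0, -5], B returns [-5, -5, 0, 0, 0, -5]
-- outside the precondition, e.g. on calculateSubjectStatistics([], 0): A returns [0, 100, 0, 0, 0, 0], B raises ValueError
import Mathlib
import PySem

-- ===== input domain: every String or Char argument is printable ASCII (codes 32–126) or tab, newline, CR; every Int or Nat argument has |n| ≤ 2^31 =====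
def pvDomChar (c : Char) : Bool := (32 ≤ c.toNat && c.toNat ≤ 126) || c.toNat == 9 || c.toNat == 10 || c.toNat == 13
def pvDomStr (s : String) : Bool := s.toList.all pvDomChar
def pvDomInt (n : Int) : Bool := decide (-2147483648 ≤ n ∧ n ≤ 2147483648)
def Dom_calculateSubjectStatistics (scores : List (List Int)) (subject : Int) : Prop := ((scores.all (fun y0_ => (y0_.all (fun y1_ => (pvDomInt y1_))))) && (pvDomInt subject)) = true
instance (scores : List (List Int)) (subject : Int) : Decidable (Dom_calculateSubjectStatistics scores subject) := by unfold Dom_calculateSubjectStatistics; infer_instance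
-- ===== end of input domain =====

-- B extracts the column once and uses builtins (max/min/index/sum); on all-≤0 or all-≥100 columns,
-- where A's 0/100 sentinel initialization yields a score no student obtained or a stale index,
-- B reports the actual extremum and its first position (stated as D_ below).

-- ===== PORT A =====
-- the loop body of A: state (highest, lowest, highestStudent, lowestStudent, passes, totalScore)
def stepA (scores : List (List Int)) (subject : Int)
    (s : Int × Int × Int × Int × Int × Int) (student : Int) : Int × Int × Int × Int × Int × Int :=
  match s with
  | (highest, lowest, highestStudent, lowestStudent, passes, totalScore) =>
    let v := PySem.List.pyGetD (PySem.List.pyGetD scores student []) subject 0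
    let highest' := if v > highest then v else highest
    let highestStudent' := if v > highest then student else highestStudent
    let lowest' := if v < lowest then v else lowest
    let lowestStudent' := if v < lowest then student else lowestStudent
    let passes' := if v ≥ 50 then passes + 1 else passes
    (highest', lowest', highestStudent', lowestStudent', passes', totalScore + v)

def calculateSubjectStatistics (scores : List (List Int)) (subject : Int) : List Int :=
  match (PySem.List.pyRange 0 (scores.length : Int) 1).foldl (stepA scores subject) (0, 100, 0, 0, 0, 0) with
  | (highest, lowest, highestStudent, lowestStudent, passes, totalScore) =>
    [highest, lowest, highestStudent, lowestStudent, passes, totalScore]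

-- ===== PORT B =====
-- pyGetD is exact here: Pre_ guarantees row[subject] is in range for every row
def calculateSubjectStatistics_alt (scores : List (List Int)) (subject : Int) : List Int :=
  let col := scores.map (fun row => PySem.List.pyGetD row subject 0)
  let highest := (PySem.List.max? col (fun x => x)).getD 0
  let lowest := (PySem.List.min? col (fun x => x)).getD 0
  let passes := ((col.filter (fun v => v ≥ 50)).length : Int)
  [highest, lowest, ((PySem.List.index? col highest).getD 0 : Nat),
   ((PySem.List.index? col lowest).getD 0 : Nat), passes, col.sum]

-- ===== PRECONDITION & SPEC =====
-- Pre_ excludes (a) rows on which scores[student][subject] raises IndexError in A, and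
-- (b) the empty score table, on which B's max([]) raises ValueError while A returns its sentinels.
def Pre_calculateSubjectStatistics (scores : List (List Int)) (subject : Int) : Prop :=
  scores ≠ [] ∧ ∀ row ∈ scores, PySem.Raise.InRange row.length subject
instance (scores : List (List Int)) (subject : Int) : Decidable (Pre_calculateSubjectStatistics scores subject) := by unfold Pre_calculateSubjectStatistics; infer_instance
def pvWitness_calculateSubjectStatistics : List (List Int) × Int := ([[40, 70], [90, 30]], 1)

-- On a nonempty table whose subject column is entirely ≤ 0 with negative first entry (or entirely
-- ≥ 100 with first entry > 100), A reports a highest of 0 (resp. lowest of 100) that no student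
-- obtained, or a stale student index 0; B reports the actual extremum and its first position.
def D_calculateSubjectStatistics (scores : List (List Int)) (subject : Int) : Prop :=
  scores ≠ [] ∧
  (((∀ row ∈ scores, PySem.List.pyGetD row subject 0 ≤ 0) ∧ PySem.List.pyGetD scores.headI subject 0 < 0) ∨
   ((∀ row ∈ scores, 100 ≤ PySem.List.pyGetD row subject 0) ∧ 100 < PySem.List.pyGetD scores.headI subject 0))
instance (scores : List (List Int)) (subject : Int) : Decidable (D_calculateSubjectStatistics scores subject) := by unfold D_calculateSubjectStatistics; infer_instance
def Spec_calculateSubjectStatistics (scores : List (List Int)) (subject : Int) (out : List Int) : Prop := ¬ D_calculateSubjectStatistics scores subject → out = calculateSubjectStatistics_alt scores subject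
instance (scores : List (List Int)) (subject : Int) (out : List Int) : Decidable (Spec_calculateSubjectStatistics scores subject out) := by unfold Spec_calculateSubjectStatistics; infer_instance
def pvDiffWitness_calculateSubjectStatistics : List (List Int) × Int := ([[-5]], 0)
def pvDiffWitnessOut_calculateSubjectStatistics : (List Int) × (List Int) := ([0, -5, 0, 0, 0, -5], [-5, -5, 0, 0, 0, -5])

-- ===== CLAIM (what is proved, stated in full; the proofs are below) =====
def Claim_unchanged_calculateSubjectStatistics : Prop := ∀ (scores : List (List Int)) (subject : Int), Dom_calculateSubjectStatistics scores subject → Pre_calculateSubjectStatistics scores subject → Spec_calculateSubjectStatistics scores subject (calculateSubjectStatistics scores subject)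
def Claim_changed_calculateSubjectStatistics : Prop := Dom_calculateSubjectStatistics (pvDiffWitness_calculateSubjectStatistics.1) (pvDiffWitness_calculateSubjectStatistics.2) ∧ Pre_calculateSubjectStatistics (pvDiffWitness_calculateSubjectStatistics.1) (pvDiffWitness_calculateSubjectStatistics.2) ∧ D_calculateSubjectStatistics (pvDiffWitness_calculateSubjectStatistics.1) (pvDiffWitness_calculateSubjectStatistics.2) ∧ calculateSubjectStatistics (pvDiffWitness_calculateSubjectStatistics.1) (pvDiffWitness_calculateSubjectStatistics.2) = pvDiffWitnessOut_calculateSubjectStatistics.1 ∧ calculateSubjectStatistics_alt (pvDiffWitness_calculateSubjectStatistics.1) (pvDiffWitness_calculateSubjectStatistics.2) = pvDiffWitnessOut_calculateSubjectStatistics.2 ∧ pvDiffWitnessOut_calculateSubjectStatistics.1 ≠ pvDiffWitnessOut_calculateSubjectStatistics.2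
def Claim_exact_calculateSubjectStatistics : Prop := ∀ (scores : List (List Int)) (subject : Int), Dom_calculateSubjectStatistics scores subject → Pre_calculateSubjectStatistics scores subject → D_calculateSubjectStatistics scores subject → calculateSubjectStatistics scores subject ≠ calculateSubjectStatistics_alt scores subject

-- ===== LEMMAS AND PROOFS =====

-- proof-side reformulation of A's loop over the extracted column, carrying the running index
def loopA : List Int → Int → Int × Int × Int × Int × Int × Int → Int × Int × Int × Int × Int × Int
  | [], _, s => s
  | v :: vs, i, (h, l, hs, ls, p, t) =>
      loopA vs (i + 1)
        (if v > h then v else h, if v < l then v else l,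
         if v > h then i else hs, if v < l then i else ls,
         if v ≥ 50 then p + 1 else p, t + v)

lemma loopA_closed (vs : List Int) (i h l hs ls p t : Int) :
    loopA vs i (h, l, hs, ls, p, t) =
      (vs.foldl max h, vs.foldl min l,
       if vs.foldl max h > h then i + ((PySem.List.index? vs (vs.foldl max h)).getD 0 : Nat) else hs,
       if vs.foldl min l < l then i + ((PySem.List.index? vs (vs.foldl min l)).getD 0 : Nat) else ls,
       p + ((vs.filter (fun v => v ≥ 50)).length : Int), t + vs.sum) := by
  induction vs generalizing i h l hs ls p t with
  | nil => simp [loopA]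
  | cons v vs ih =>
    have hmax : (if v > h then v else h) = max h v := by split_ifs <;> omega
    have hmin : (if v < l then v else l) = min l v := by split_ifs <;> omega
    rw [loopA, hmax, hmin, ih]
    simp only [List.foldl_cons, List.filter_cons, List.sum_cons, Prod.mk.injEq]
    refine ⟨trivial, trivial, ?_, ?_, ?_, by omega⟩
    · -- highest-student component
      have hMge : max h v ≤ vs.foldl max (max h v) := (PySem.List.le_foldl_max vs (max h v)).1
      by_cases hM : vs.foldl max (max h v) > max h v
      · rw [if_pos hM, if_pos (by omega)]
        have hmem : vs.foldl max (max h v) ∈ vs :=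
          (PySem.List.foldl_max_mem vs (max h v)).resolve_left (by omega)
        obtain ⟨k, hk⟩ := Option.isSome_iff_exists.mp
          ((PySem.List.index?_isSome_iff vs (vs.foldl max (max h v))).2 hmem)
        rw [PySem.List.index?_cons_of_ne vs (show v ≠ vs.foldl max (max h v) by omega), hk]
        simp; omega
      · rw [if_neg hM]
        by_cases hv : v > h
        · have hMv : vs.foldl max (max h v) = v := by omega
          rw [if_pos hv, if_pos (by omega), hMv, PySem.List.index?_cons_self]
          simp
        · rw [if_neg hv, if_neg (by omega)]
    · -- lowest-student component
      have hMle : vs.foldl min (min l v) ≤ min l v := (PySem.List.foldl_min_le vs (min l v)).1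
      by_cases hM : vs.foldl min (min l v) < min l v
      · rw [if_pos hM, if_pos (by omega)]
        have hmem : vs.foldl min (min l v) ∈ vs :=
          (PySem.List.foldl_min_mem vs (min l v)).resolve_left (by omega)
        obtain ⟨k, hk⟩ := Option.isSome_iff_exists.mp
          ((PySem.List.index?_isSome_iff vs (vs.foldl min (min l v))).2 hmem)
        rw [PySem.List.index?_cons_of_ne vs (show v ≠ vs.foldl min (min l v) by omega), hk]
        simp; omega
      · rw [if_neg hM]
        by_cases hv : v < l
        · have hMv : vs.foldl min (min l v) = v := by omega
          rw [if_pos hv, if_pos (by omega), hMv, PySem.List.index?_cons_self]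
          simp
        · rw [if_neg hv, if_neg (by omega)]
    · -- passes component
      simp only [decide_eq_true_eq]
      split_ifs <;> first | (simp only [List.length_cons]; push_cast; omega) | omega

-- A's index loop on a suffix of the score table equals loopA on the suffix's extracted column
lemma foldA_gen (subject : Int) (pre rest : List (List Int)) (s : Int × Int × Int × Int × Int × Int) :
    (PySem.List.pyRange (pre.length : Int) (((pre ++ rest).length : Nat) : Int) 1).foldl
        (stepA (pre ++ rest) subject) s
      = loopA (rest.map (fun row => PySem.List.pyGetD row subject 0)) (pre.length : Int) s := by
  induction rest generalizing pre s with
  | nil => simp [loopA, PySem.List.pyRange_one_eq_nil]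
  | cons r rest ih =>
    obtain ⟨h, l, hs, ls, p, t⟩ := s
    rw [PySem.List.pyRange_one_cons (by simp)]
    have hget : PySem.List.pyGetD (pre ++ r :: rest) (pre.length : Int) [] = r := by
      show (PySem.List.pyGet? (pre ++ r :: rest) (pre.length : Int)).getD [] = r
      rw [PySem.List.pyGet?_append_length]; rfl
    have hstep : stepA (pre ++ r :: rest) subject (h, l, hs, ls, p, t) (pre.length : Int)
        = (let v := PySem.List.pyGetD r subject 0;
           (if v > h then v else h, if v < l then v else l,
            if v > h then (pre.length : Int) else hs, if v < l then (pre.length : Int) else ls,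
            if v ≥ 50 then p + 1 else p, t + v)) := by
      simp only [stepA, hget]
    rw [List.foldl_cons, hstep]
    have hre : pre ++ r :: rest = (pre ++ [r]) ++ rest := by simp
    have hlen : ((pre.length : Int)) + 1 = ((pre ++ [r]).length : Int) := by simp
    rw [List.map_cons, loopA]
    simp only [hre, hlen]
    exact ih (pre ++ [r]) _

lemma foldA_eq_loopA (scores : List (List Int)) (subject : Int) :
    (PySem.List.pyRange 0 (scores.length : Int) 1).foldl (stepA scores subject) (0, 100, 0, 0, 0, 0)
      = loopA (scores.map (fun row => PySem.List.pyGetD row subject 0)) 0 (0, 100, 0, 0, 0, 0) := by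
  have := foldA_gen subject [] scores (0, 100, 0, 0, 0, 0)
  simpa using this

lemma foldl_max_swap (l : List Int) (a b : Int) : l.foldl max (max a b) = max a (l.foldl max b) := by
  induction l generalizing b with
  | nil => rfl
  | cons x l ih => simp only [List.foldl_cons, max_assoc, ih]

lemma foldl_min_swap (l : List Int) (a b : Int) : l.foldl min (min a b) = min a (l.foldl min b) := by
  induction l generalizing b with
  | nil => rfl
  | cons x l ih => simp only [List.foldl_cons, min_assoc, ih]

-- the highest/highestStudent components agree outside the all-≤0-with-negative-head region
lemma maxSide (v0 : Int) (vs : List Int)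
    (hnd : ¬((∀ v ∈ v0 :: vs, v ≤ 0) ∧ v0 < 0)) :
    (v0 :: vs).foldl max 0 = vs.foldl max v0 ∧
    (if (v0 :: vs).foldl max 0 > 0
       then (((PySem.List.index? (v0 :: vs) ((v0 :: vs).foldl max 0)).getD 0 : Nat) : Int) else 0)
      = (((PySem.List.index? (v0 :: vs) (vs.foldl max v0)).getD 0 : Nat) : Int) := by
  have hrw : (v0 :: vs).foldl max 0 = max 0 (vs.foldl max v0) := by
    rw [List.foldl_cons]
    have : max 0 v0 = max 0 v0 := rfl
    rw [show (max (0:Int) v0) = max 0 v0 from rfl, foldl_max_swap]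
  have hge := PySem.List.le_foldl_max vs v0
  by_cases hpos : 0 < vs.foldl max v0
  · have h1 : (v0 :: vs).foldl max 0 = vs.foldl max v0 := by rw [hrw]; omega
    refine ⟨h1, ?_⟩
    rw [h1, if_pos hpos]
  · -- the whole column is ≤ 0; ¬D forces v0 = 0, hence the max is 0 at position 0
    have hall : ∀ v ∈ v0 :: vs, v ≤ 0 := by
      intro v hv
      rcases List.mem_cons.mp hv with h | h
      · omega
      · have := hge.2 v h; omega
    have hv0 : v0 = 0 := by
      have : ¬ v0 < 0 := fun h => hnd ⟨hall, h⟩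
      have := hall v0 (List.mem_cons_self ..)
      omega
    have hM0 : vs.foldl max v0 = 0 := by have := hge.1; omega
    have h1 : (v0 :: vs).foldl max 0 = vs.foldl max v0 := by rw [hrw]; omega
    refine ⟨h1, ?_⟩
    rw [h1, if_neg (by omega), hM0, hv0, PySem.List.index?_cons_self]
    simp

-- the lowest/lowestStudent components agree outside the all-≥100-with-head->100 region
lemma minSide (v0 : Int) (vs : List Int)
    (hnd : ¬((∀ v ∈ v0 :: vs, 100 ≤ v) ∧ 100 < v0)) :
    (v0 :: vs).foldl min 100 = vs.foldl min v0 ∧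
    (if (v0 :: vs).foldl min 100 < 100
       then (((PySem.List.index? (v0 :: vs) ((v0 :: vs).foldl min 100)).getD 0 : Nat) : Int) else 0)
      = (((PySem.List.index? (v0 :: vs) (vs.foldl min v0)).getD 0 : Nat) : Int) := by
  have hrw : (v0 :: vs).foldl min 100 = min 100 (vs.foldl min v0) := by
    rw [List.foldl_cons, foldl_min_swap]
  have hle := PySem.List.foldl_min_le vs v0
  by_cases hlt : vs.foldl min v0 < 100
  · have h1 : (v0 :: vs).foldl min 100 = vs.foldl min v0 := by rw [hrw]; omega
    refine ⟨h1, ?_⟩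
    rw [h1, if_pos hlt]
  · have hall : ∀ v ∈ v0 :: vs, 100 ≤ v := by
      intro v hv
      rcases List.mem_cons.mp hv with h | h
      · have := hle.1; omega
      · have := hle.2 v h; omega
    have hv0 : v0 = 100 := by
      have : ¬ 100 < v0 := fun h => hnd ⟨hall, h⟩
      have := hall v0 (List.mem_cons_self ..)
      omega
    have hm0 : vs.foldl min v0 = 100 := by have := hle.1; omega
    have h1 : (v0 :: vs).foldl min 100 = vs.foldl min v0 := by rw [hrw]; omega
    refine ⟨h1, ?_⟩
    rw [h1, if_neg (by omega), hm0, hv0, PySem.List.index?_cons_self]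
    simp

-- ===== VERDICT (by name: the statements are the Claim_ definitions above) =====
theorem calculateSubjectStatistics_spec : Claim_unchanged_calculateSubjectStatistics := by
  intro scores subject _ hPre hnD
  obtain ⟨hne, _⟩ := hPre
  unfold calculateSubjectStatistics calculateSubjectStatistics_alt
  rw [foldA_eq_loopA, loopA_closed]
  obtain ⟨r0, rs, rfl⟩ := List.exists_cons_of_ne_nil hne
  set v0 := PySem.List.pyGetD r0 subject 0 with hv0
  set vs := rs.map (fun row => PySem.List.pyGetD row subject 0) with hvs
  have hcol : (r0 :: rs).map (fun row => PySem.List.pyGetD row subject 0) = v0 :: vs := by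
    simp [hv0, hvs]
  have hndmax : ¬((∀ v ∈ v0 :: vs, v ≤ 0) ∧ v0 < 0) := by
    intro ⟨hall, hhd⟩
    exact hnD ⟨by simp, Or.inl ⟨by
      intro row hrow
      exact hall _ (by rw [← hcol]; exact List.mem_map_of_mem hrow), by simpa using hhd⟩⟩
  have hndmin : ¬((∀ v ∈ v0 :: vs, 100 ≤ v) ∧ 100 < v0) := by
    intro ⟨hall, hhd⟩
    exact hnD ⟨by simp, Or.inr ⟨by
      intro row hrow
      exact hall _ (by rw [← hcol]; exact List.mem_map_of_mem hrow), by simpa using hhd⟩⟩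
  obtain ⟨hmax1, hmax2⟩ := maxSide v0 vs hndmax
  obtain ⟨hmin1, hmin2⟩ := minSide v0 vs hndmin
  simp only [hcol, PySem.List.max?_id_cons, PySem.List.min?_id_cons, Option.getD_some,
    zero_add, List.cons.injEq]
  exact ⟨hmax1, hmin1, hmax2, hmin2, trivial⟩

theorem calculateSubjectStatistics_changed : Claim_changed_calculateSubjectStatistics := by
  unfold Claim_changed_calculateSubjectStatistics; decide

theorem calculateSubjectStatistics_tight : Claim_exact_calculateSubjectStatistics := by
  intro scores subject _ hPre hD heq
  obtain ⟨hne, _⟩ := hPre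
  obtain ⟨_, hD⟩ := hD
  obtain ⟨r0, rs, rfl⟩ := List.exists_cons_of_ne_nil hne
  set v0 := PySem.List.pyGetD r0 subject 0 with hv0
  set vs := rs.map (fun row => PySem.List.pyGetD row subject 0) with hvs
  have hcol : (r0 :: rs).map (fun row => PySem.List.pyGetD row subject 0) = v0 :: vs := by
    simp [hv0, hvs]
  unfold calculateSubjectStatistics calculateSubjectStatistics_alt at heq
  rw [foldA_eq_loopA, loopA_closed] at heq
  simp only [hcol, PySem.List.max?_id_cons, PySem.List.min?_id_cons, Option.getD_some,
    zero_add, List.cons.injEq, and_true] at heq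
  obtain ⟨e0, e1, e2, e3⟩ := heq
  rcases hD with ⟨hall, hhd⟩ | ⟨hall, hhd⟩
  · -- all ≤ 0, v0 < 0: A's highest is max 0 M; B's is M
    have hallc : ∀ v ∈ v0 :: vs, v ≤ 0 := by
      rw [← hcol]; intro v hv
      obtain ⟨row, hrow, rfl⟩ := List.mem_map.mp hv
      exact hall row hrow
    have hhd' : v0 < 0 := by simpa [hv0] using hhd
    have hge := PySem.List.le_foldl_max vs v0
    have hMle : vs.foldl max v0 ≤ 0 := by
      rcases PySem.List.foldl_max_mem vs v0 with h | h
      · omega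
      · exact hallc _ (List.mem_cons_of_mem _ h)
    have hA0 : (v0 :: vs).foldl max 0 = max 0 (vs.foldl max v0) := by
      rw [List.foldl_cons, foldl_max_swap]
    by_cases hM : vs.foldl max v0 < 0
    · rw [hA0] at e0; omega
    · -- M = 0 but v0 < 0: B's index of 0 is positive, A's highestStudent is 0
      have hM0 : vs.foldl max v0 = 0 := by omega
      have hmem0 : (0 : Int) ∈ vs := by
        rcases PySem.List.foldl_max_mem vs v0 with h | h
        · omega
        · rw [hM0] at h; exact h
      obtain ⟨k, hk⟩ := Option.isSome_iff_exists.mp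
        ((PySem.List.index?_isSome_iff vs (0 : Int)).2 hmem0)
      rw [hA0, hM0] at e2
      rw [PySem.List.index?_cons_of_ne vs (by omega : v0 ≠ 0), hk] at e2
      simp at e2
      omega
  · -- all ≥ 100, 100 < v0: A's lowest is min 100 m; B's is m
    have hallc : ∀ v ∈ v0 :: vs, 100 ≤ v := by
      rw [← hcol]; intro v hv
      obtain ⟨row, hrow, rfl⟩ := List.mem_map.mp hv
      exact hall row hrow
    have hhd' : 100 < v0 := by simpa [hv0] using hhd
    have hle := PySem.List.foldl_min_le vs v0
    have hmge : 100 ≤ vs.foldl min v0 := by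
      rcases PySem.List.foldl_min_mem vs v0 with h | h
      · omega
      · exact hallc _ (List.mem_cons_of_mem _ h)
    have hA1 : (v0 :: vs).foldl min 100 = min 100 (vs.foldl min v0) := by
      rw [List.foldl_cons, foldl_min_swap]
    by_cases hm : 100 < vs.foldl min v0
    · rw [hA1] at e1; omega
    · have hm0 : vs.foldl min v0 = 100 := by omega
      have hmem0 : (100 : Int) ∈ vs := by
        rcases PySem.List.foldl_min_mem vs v0 with h | h
        · omega
        · rw [hm0] at h; exact h
      obtain ⟨k, hk⟩ := Option.isSome_iff_exists.mp
        ((PySem.List.index?_isSome_iff vs (100 : Int)).2 hmem0)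
      rw [hA1, hm0] at e3
      rw [PySem.List.index?_cons_of_ne vs (by omega : v0 ≠ 100), hk] at e3
      simp at e3
      omega
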